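-- pv_equiv track=rewrite | github.com/nexon33/voynich-grammar-analysis | scripts/phase4/validate_dor_as_red.py | find_cooccurrence_with_known
-- ===== SOURCE A (Python) =====
-- from collections import Counter, defaultdict
--
-- def find_cooccurrence_with_known(target, all_words, known_roots, window=3):
--     """Check co-occurrence with known nouns"""
--
--     cooccur = defaultdict(int)
--
--     for i, word in enumerate(all_words):
--         if target in word:
--             # Check window
--             start = max(0, i - window)
--             end = min(len(all_words), i + window + 1)
--
--             for j in range(start, end):
--                 if j != i:
--                     for known in known_roots:
--                         if known in all_words[j]:
--                             cooccur[known] += 1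
--
--     return cooccur
-- ===== SOURCE B (Python) =====
-- from collections import defaultdict
--
-- def find_cooccurrence_with_known(target, all_words, known_roots, window=3):
--     """Check co-occurrence with known nouns"""
--     n = len(all_words)
--     # Pass 1: indices of words containing the target.
--     hits = [i for i, w in enumerate(all_words) if target in w]
--     # Pass 2: for each window index actually needed, compute once the list of
--     # known roots present in that word (duplicates/order of known_roots kept).
--     present = {}
--     for i in hits:
--         for j in range(max(0, i - window), min(n, i + window + 1)):
--             if j != i and j not in present:
--                 present[j] = [k for k in known_roots if k in all_words[j]]
--     # Pass 3: accumulate over the windows using the table.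
--     cooccur = defaultdict(int)
--     for i in hits:
--         for j in range(max(0, i - window), min(n, i + window + 1)):
--             if j != i:
--                 for known in present[j]:
--                     cooccur[known] += 1
--     return cooccur
-- ===== Notes on version B (the rewrite author's own statement) =====
-- stated objective: alternative
-- what changed: B first collects the target-hit indices, then builds once a table mapping each window index to the list of known roots its word contains, and finally accumulates counts by walking that table, instead of A's rescan of known_roots with substring tests inside the nested window loop.
import Mathlib
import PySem

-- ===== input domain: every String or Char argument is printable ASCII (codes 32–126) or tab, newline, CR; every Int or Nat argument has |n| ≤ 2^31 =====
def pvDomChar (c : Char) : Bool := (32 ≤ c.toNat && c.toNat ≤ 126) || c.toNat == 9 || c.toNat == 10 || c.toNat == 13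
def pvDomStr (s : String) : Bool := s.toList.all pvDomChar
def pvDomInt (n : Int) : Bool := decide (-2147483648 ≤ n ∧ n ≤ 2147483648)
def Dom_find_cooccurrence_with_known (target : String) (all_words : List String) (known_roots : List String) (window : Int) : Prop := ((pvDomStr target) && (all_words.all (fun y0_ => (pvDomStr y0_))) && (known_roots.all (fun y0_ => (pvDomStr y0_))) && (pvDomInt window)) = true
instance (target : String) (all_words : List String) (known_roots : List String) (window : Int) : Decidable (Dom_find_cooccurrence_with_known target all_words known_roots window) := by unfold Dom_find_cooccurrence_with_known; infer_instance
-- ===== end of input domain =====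

-- B collects target-hit indices, builds a per-index table of the known roots each needed word contains, then accumulates over windows from that table (objective: alternative decomposition, no speed claim).


-- ===== PORT A =====
def find_cooccurrence_with_known (target : String) (all_words : List String) (known_roots : List String) (window : Int) : List (String × Int) :=
  let cooccur : PySem.Dict String Int :=
    (PySem.List.enumerate all_words).foldl (fun d p =>
      if PySem.Str.isIn target p.2 then
        (PySem.List.pyRange (max 0 (p.1 - window)) (min (all_words.length : Int) (p.1 + window + 1)) 1).foldl
          (fun d j =>
            if j ≠ p.1 then
              known_roots.foldl (fun d known =>
                if PySem.Str.isIn known (PySem.List.pyGetD all_words j "") then d.modify known 0 (· + 1) else d) d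
            else d) d
      else d) PySem.Dict.empty
  cooccur.items

-- ===== PORT B =====
-- present[j] in Source B: a key proved present is read with getD (totality guard only; see contains/reach lemmas below).
def find_cooccurrence_with_known_alt (target : String) (all_words : List String) (known_roots : List String) (window : Int) : List (String × Int) :=
  let n : Int := all_words.length
  let hits : List Int := ((PySem.List.enumerate all_words).filter (fun p => PySem.Str.isIn target p.2)).map (·.1)
  let present : PySem.Dict Int (List String) :=
    hits.foldl (fun d i =>
      (PySem.List.pyRange (max 0 (i - window)) (min n (i + window + 1)) 1).foldl
        (fun d j =>
          if j ≠ i ∧ d.contains j = false then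
            d.insert j (known_roots.filter (fun k => PySem.Str.isIn k (PySem.List.pyGetD all_words j "")))
          else d) d) PySem.Dict.empty
  let cooccur : PySem.Dict String Int :=
    hits.foldl (fun d i =>
      (PySem.List.pyRange (max 0 (i - window)) (min n (i + window + 1)) 1).foldl
        (fun d j =>
          if j ≠ i then
            (present.getD j []).foldl (fun d known => d.modify known 0 (· + 1)) d
          else d) d) PySem.Dict.empty
  cooccur.items

-- ===== PRECONDITION & SPEC =====
def Spec_find_cooccurrence_with_known (target : String) (all_words : List String) (known_roots : List String) (window : Int) (out : List (String × Int)) : Prop := out = find_cooccurrence_with_known_alt target all_words known_roots window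
instance (target : String) (all_words : List String) (known_roots : List String) (window : Int) (out : List (String × Int)) : Decidable (Spec_find_cooccurrence_with_known target all_words known_roots window out) := by unfold Spec_find_cooccurrence_with_known; infer_instance

-- ===== CLAIM (what is proved, stated in full; the proofs are below) =====
def Claim_equal_find_cooccurrence_with_known : Prop := ∀ (target : String) (all_words : List String) (known_roots : List String) (window : Int), Dom_find_cooccurrence_with_known target all_words known_roots window → Spec_find_cooccurrence_with_known target all_words known_roots window (find_cooccurrence_with_known target all_words known_roots window)

-- ===== LEMMAS AND PROOFS =====

-- One step of B's table-building loop.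
def pvStep (f : Int → List String) (d : PySem.Dict Int (List String)) (i j : Int) : PySem.Dict Int (List String) :=
  if j ≠ i ∧ d.contains j = false then d.insert j (f j) else d

-- A's guarded scan of known_roots equals a plain fold over the filtered list.
theorem foldl_guard_eq_foldl_filter (kr : List String) (w : String) (d : PySem.Dict String Int) :
    kr.foldl (fun d known => if PySem.Str.isIn known w then d.modify known 0 (· + 1) else d) d
      = (kr.filter (fun k => PySem.Str.isIn k w)).foldl (fun d known => d.modify known 0 (· + 1)) d := by
  induction kr generalizing d with
  | nil => rfl
  | cons x xs ih =>
      simp only [List.foldl_cons, List.filter_cons]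
      by_cases h : PySem.Str.isIn x w
      · rw [if_pos h, if_pos h, List.foldl_cons, ih]
      · rw [if_neg h, if_neg h, ih]

-- Folding a guarded body over an enumeration equals folding the plain body over the filtered-and-projected index list.
theorem foldl_enum_filter {β : Type} (l : List (Int × String)) (q : String → Bool) (g : β → Int → β) (d : β) :
    l.foldl (fun d p => if q p.2 then g d p.1 else d) d
      = ((l.filter (fun p => q p.2)).map (·.1)).foldl g d := by
  induction l generalizing d with
  | nil => rfl
  | cons x xs ih =>
      simp only [List.foldl_cons, List.filter_cons]
      by_cases h : q x.2
      · rw [if_pos h, if_pos h]; simp only [List.map_cons, List.foldl_cons, ih]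
      · rw [if_neg h, if_neg h, ih]

-- pvStep never removes a key.
theorem contains_pvStep (f : Int → List String) (d : PySem.Dict Int (List String)) (i j x : Int)
    (h : d.contains x = true) : (pvStep f d i j).contains x = true := by
  unfold pvStep; split
  · rw [PySem.Dict.contains_insert]; simp [h]
  · exact h

-- pvStep keeps the invariant "every stored value is f of its key".
theorem good_pvStep (f : Int → List String) (d : PySem.Dict Int (List String)) (i j : Int)
    (h : ∀ x, d.contains x = true → d.getD x [] = f x) :
    ∀ x, (pvStep f d i j).contains x = true → (pvStep f d i j).getD x [] = f x := by
  intro x hx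
  unfold pvStep at hx ⊢
  split
  · rw [PySem.Dict.getD_insert]
    split
    · next hxj => rw [hxj]
    · next hxj =>
        rw [if_pos ‹_›] at hx
        rw [PySem.Dict.contains_insert] at hx
        simp only [Bool.or_eq_true, beq_iff_eq] at hx
        rcases hx with h1 | h1
        · exact absurd h1 hxj
        · exact h x h1
  · rw [if_neg ‹_›] at hx
    exact h x hx

-- The inner range fold: key preservation, invariant preservation, and reachability of each j ≠ i.
theorem contains_inner (f : Int → List String) (l : List Int) (i x : Int) (d : PySem.Dict Int (List String))
    (h : d.contains x = true) : (l.foldl (fun d j => pvStep f d i j) d).contains x = true := by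
  induction l generalizing d with
  | nil => exact h
  | cons y ys ih => exact ih _ (contains_pvStep f d i y x h)

theorem good_inner (f : Int → List String) (l : List Int) (i : Int) (d : PySem.Dict Int (List String))
    (h : ∀ x, d.contains x = true → d.getD x [] = f x) :
    ∀ x, (l.foldl (fun d j => pvStep f d i j) d).contains x = true →
      (l.foldl (fun d j => pvStep f d i j) d).getD x [] = f x := by
  induction l generalizing d with
  | nil => exact h
  | cons y ys ih => exact ih _ (good_pvStep f d i y h)

theorem reach_inner (f : Int → List String) (l : List Int) (i j : Int) (hne : j ≠ i) :
    ∀ d : PySem.Dict Int (List String), j ∈ l →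
      (l.foldl (fun d j => pvStep f d i j) d).contains j = true := by
  induction l with
  | nil => intro d hj; cases hj
  | cons y ys ih =>
      intro d hj
      rw [List.foldl_cons]
      rcases List.mem_cons.mp hj with h | h
      · subst h
        refine contains_inner f ys i j _ ?_
        unfold pvStep
        split
        · exact PySem.Dict.contains_insert_self _ _ _
        · next hc =>
            rcases Decidable.em (d.contains j = false) with hb | hb
            · exact absurd ⟨hne, hb⟩ hc
            · simpa using hb
      · exact ih _ h

-- The outer fold over hits: same three facts lifted.
theorem contains_outer (f : Int → List String) (hits : List Int) (window n : Int) (x : Int)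
    (d : PySem.Dict Int (List String)) (h : d.contains x = true) :
    (hits.foldl (fun d i => (PySem.List.pyRange (max 0 (i - window)) (min n (i + window + 1)) 1).foldl
        (fun d j => pvStep f d i j) d) d).contains x = true := by
  induction hits generalizing d with
  | nil => exact h
  | cons y ys ih => exact ih _ (contains_inner f _ y x d h)

theorem good_outer (f : Int → List String) (hits : List Int) (window n : Int)
    (d : PySem.Dict Int (List String)) (h : ∀ x, d.contains x = true → d.getD x [] = f x) :
    ∀ x, (hits.foldl (fun d i => (PySem.List.pyRange (max 0 (i - window)) (min n (i + window + 1)) 1).foldl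
        (fun d j => pvStep f d i j) d) d).contains x = true →
      (hits.foldl (fun d i => (PySem.List.pyRange (max 0 (i - window)) (min n (i + window + 1)) 1).foldl
        (fun d j => pvStep f d i j) d) d).getD x [] = f x := by
  induction hits generalizing d with
  | nil => exact h
  | cons y ys ih => exact ih _ (good_inner f _ y d h)

theorem reach_outer (f : Int → List String) (hits : List Int) (window n : Int) (i j : Int)
    (hj : j ∈ PySem.List.pyRange (max 0 (i - window)) (min n (i + window + 1)) 1) (hne : j ≠ i) :
    ∀ d : PySem.Dict Int (List String), i ∈ hits →
      (hits.foldl (fun d i => (PySem.List.pyRange (max 0 (i - window)) (min n (i + window + 1)) 1).foldl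
        (fun d j => pvStep f d i j) d) d).contains j = true := by
  induction hits with
  | nil => intro d hi; cases hi
  | cons y ys ih =>
      intro d hi
      rw [List.foldl_cons]
      rcases List.mem_cons.mp hi with h | h
      · subst h
        exact contains_outer f ys window n j _ (reach_inner f _ i j hne d hj)
      · exact ih _ h

-- ===== VERDICT (by name: the statement is the Claim_ definition above) =====
theorem find_cooccurrence_with_known_spec : Claim_equal_find_cooccurrence_with_known := by
  intro target all_words known_roots window _
  unfold Spec_find_cooccurrence_with_known find_cooccurrence_with_known find_cooccurrence_with_known_alt
  apply congrArg PySem.Dict.items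
  refine (foldl_enum_filter (PySem.List.enumerate all_words)
      (fun w => PySem.Str.isIn target w)
      (fun d i =>
        (PySem.List.pyRange (max 0 (i - window)) (min (all_words.length : Int) (i + window + 1)) 1).foldl
          (fun d j =>
            if j ≠ i then
              known_roots.foldl (fun d known =>
                if PySem.Str.isIn known (PySem.List.pyGetD all_words j "") then d.modify known 0 (· + 1) else d) d
            else d) d)
      (PySem.Dict.empty : PySem.Dict String Int)).trans ?_
  apply PySem.List.foldl_congr_mem
  intro d i hi
  apply PySem.List.foldl_congr_mem
  intro d' j hj
  by_cases hji : j = i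
  · simp [hji]
  · rw [if_pos hji, if_pos hji, foldl_guard_eq_foldl_filter]
    congr 1
    have hc := reach_outer
      (fun j => known_roots.filter (fun k => PySem.Str.isIn k (PySem.List.pyGetD all_words j "")))
      (((PySem.List.enumerate all_words).filter (fun p => PySem.Str.isIn target p.2)).map (·.1))
      window (all_words.length : Int) i j hj hji PySem.Dict.empty hi
    exact (good_outer (fun j => known_roots.filter (fun k => PySem.Str.isIn k (PySem.List.pyGetD all_words j "")))
      (((PySem.List.enumerate all_words).filter (fun p => PySem.Str.isIn target p.2)).map (·.1))
      window (all_words.length : Int) PySem.Dict.empty (by simp [PySem.Dict.contains_empty]) j hc).symm
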